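-- pv_equiv track=rewrite | github.com/capac/python-exercises | hackerrank/day_of_programmer.py | dayOfProgrammer
-- ===== SOURCE A (Python) =====
-- def dayOfProgrammer(year):
--     year = int(year)
--     months = [31, 28, 31, 30, 31, 30, 31, 31, 30, 31, 30, 31]
--     prog_day = 256
--     # Gregorian calendar
--     if year > 1918 and ((year % 4 == 0 and year % 100 != 0) or (year % 400 == 0)):
--         months[1] += 1
--     # Jump from Julian to Gregorian
--     elif year == 1918:
--         months[1] = 15
--     # Julian calendar
--     elif year < 1918 and year % 4 == 0:
--         months[1] += 1
--     cumul_months = []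
--     count_days = 0
--     for days in months:
--         count_days += days
--         cumul_months.append(count_days)
--     for counter, days in enumerate(cumul_months):
--         diff = days - prog_day
--         if diff > 0:
--             month = months[counter]
--             month -= diff
--             break
--     result = f'{str(month).zfill(2)}.{str(counter+1).zfill(2)}.{str(year)}'
--     return result
-- ===== SOURCE B (Python) =====
-- def dayOfProgrammer(year):
--     # Closed form: the 256th day always falls in September.
--     year = int(year)
--     if year == 1918:
--         day = 26
--     elif (year > 1918 and ((year % 4 == 0 and year % 100 != 0) or year % 400 == 0)) or (year < 1918 and year % 4 == 0):
--         day = 12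
--     else:
--         day = 13
--     return f'{day}.09.{year}'
-- ===== Notes on version B (the rewrite author's own statement) =====
-- stated objective: simpler
-- what changed: Replaced the months array, cumulative-sum scan and enumerate-with-break search by a closed form: the 256th day always falls in September, so B just selects the day of month from the same 1918/leap-year branches and formats it directly.
import Mathlib
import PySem

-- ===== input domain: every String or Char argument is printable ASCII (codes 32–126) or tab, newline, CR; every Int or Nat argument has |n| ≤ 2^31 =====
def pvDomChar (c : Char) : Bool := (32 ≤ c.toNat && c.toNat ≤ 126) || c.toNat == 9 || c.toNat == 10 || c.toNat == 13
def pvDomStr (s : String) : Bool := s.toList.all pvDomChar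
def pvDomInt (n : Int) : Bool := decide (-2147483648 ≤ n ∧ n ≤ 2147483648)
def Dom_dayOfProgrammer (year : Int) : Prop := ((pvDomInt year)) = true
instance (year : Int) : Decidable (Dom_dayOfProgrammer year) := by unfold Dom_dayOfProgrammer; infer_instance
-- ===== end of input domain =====

-- B replaces A's months array + cumulative-sum scan + break-search by the closed form:
-- the 256th day is always in September (simpler; return value only, no side effects).

-- ===== PORT A =====
-- 'for counter, days in enumerate(cumul_months): … break' — first index whose cumulative
-- total exceeds 256; returns (month, counter).  If no break fires Python would raise
-- NameError on 'month'; that is unreachable (totals always exceed 256), the [] case's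
-- (0, 0) is a placeholder for that unreachable NameError.
def pvFindBreak (months : List Int) (cumul : List (Int × Int)) : Int × Int :=
  match cumul with
  | [] => (0, 0)
  | (counter, days) :: rest =>
    let diff := days - 256
    if diff > 0 then (PySem.List.pyGetD months counter 0 - diff, counter)
    else pvFindBreak months rest

def dayOfProgrammer (year : Int) : String :=
  let months : List Int := [31, 28, 31, 30, 31, 30, 31, 31, 30, 31, 30, 31]
  let months :=
    if year > 1918 ∧ ((year % 4 = 0 ∧ year % 100 ≠ 0) ∨ year % 400 = 0) then
      PySem.List.pySetD months 1 (PySem.List.pyGetD months 1 0 + 1)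
    else if year = 1918 then PySem.List.pySetD months 1 15
    else if year < 1918 ∧ year % 4 = 0 then
      PySem.List.pySetD months 1 (PySem.List.pyGetD months 1 0 + 1)
    else months
  let cumul := (months.foldl (fun (st : Int × List Int) days =>
      (st.1 + days, st.2 ++ [st.1 + days])) (0, [])).2
  let mc := pvFindBreak months (PySem.List.enumerate cumul)
  PySem.Str.zfill (PySem.Int.toStr mc.1) 2 ++ "." ++
    PySem.Str.zfill (PySem.Int.toStr (mc.2 + 1)) 2 ++ "." ++ PySem.Int.toStr year

-- ===== PORT B =====
def dayOfProgrammer_alt (year : Int) : String :=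
  let day : Int :=
    if year = 1918 then 26
    else if (year > 1918 ∧ ((year % 4 = 0 ∧ year % 100 ≠ 0) ∨ year % 400 = 0)) ∨
            (year < 1918 ∧ year % 4 = 0) then 12
    else 13
  PySem.Int.toStr day ++ ".09." ++ PySem.Int.toStr year

-- ===== PRECONDITION & SPEC =====
def Spec_dayOfProgrammer (year : Int) (out : String) : Prop := out = dayOfProgrammer_alt year
instance (year : Int) (out : String) : Decidable (Spec_dayOfProgrammer year out) := by unfold Spec_dayOfProgrammer; infer_instance

-- ===== CLAIM (what is proved, stated in full; the proofs are below) =====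
def Claim_equal_dayOfProgrammer : Prop := ∀ (year : Int), Dom_dayOfProgrammer year → Spec_dayOfProgrammer year (dayOfProgrammer year)

-- ===== LEMMAS AND PROOFS =====

-- ===== VERDICT (by name: the statement is the Claim_ definition above) =====
theorem dayOfProgrammer_spec : Claim_equal_dayOfProgrammer := by
  intro year _
  show dayOfProgrammer year = dayOfProgrammer_alt year
  unfold dayOfProgrammer dayOfProgrammer_alt
  dsimp only
  by_cases h18 : year = 1918
  · subst h18; decide
  · by_cases hg : year > 1918 ∧ ((year % 4 = 0 ∧ year % 100 ≠ 0) ∨ year % 400 = 0)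
    · rw [if_pos hg, if_neg h18, if_pos (Or.inl hg)]
      congr 1
    · by_cases hj : year < 1918 ∧ year % 4 = 0
      · rw [if_neg hg, if_neg h18, if_neg h18, if_pos hj, if_pos (Or.inr hj)]
        congr 1
      · rw [if_neg hg, if_neg h18, if_neg h18, if_neg hj, if_neg (by tauto : ¬((year > 1918 ∧ ((year % 4 = 0 ∧ year % 100 ≠ 0) ∨ year % 400 = 0)) ∨ (year < 1918 ∧ year % 4 = 0)))]
        congr 1
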